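-- pv_equiv track=rewrite | github.com/nishaq503/image-tools | transforms/autocropping-tool/src/polus/images/transforms/autocropping/utils.py | iter_tiles_bbox
-- ===== SOURCE A (Python) =====
-- import typing
--
-- TILE_SIZE = 2_048
--
-- def iter_tiles_bbox(
--     bbox: tuple[int, int, int, int],
--     tile_size: int = TILE_SIZE,
-- ) -> typing.Generator[tuple[int, int, int, int], None, None]:
--     """Iterate over 2D tiles in a bounding box.
--
--     Args:
--         bbox: The bounding box to iterate over.
--         tile_size: The size of the tiles.
--
--     Yields:
--         The x and y coordinates of the top-left corner and the bottom-right corner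
--         of each tile.
--     """
--     x_min, y_min, x_max, y_max = bbox
--     for y in range(y_min, y_max, tile_size):
--         y_end = min(y + tile_size, y_max)
--         for x in range(x_min, x_max, tile_size):
--             x_end = min(x + tile_size, x_max)
--             yield x, y, x_end, y_end
-- ===== SOURCE B (Python) =====
-- TILE_SIZE = 2_048
--
-- def iter_tiles_bbox(bbox, tile_size=TILE_SIZE):
--     """Flat iteration: a single loop over the tile index k; divmod recovers (row, col)."""
--     x_min, y_min, x_max, y_max = bbox
--     nx = len(range(x_min, x_max, tile_size))
--     ny = len(range(y_min, y_max, tile_size))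
--     for k in range(nx * ny):
--         i, j = divmod(k, nx)
--         x = x_min + j * tile_size
--         y = y_min + i * tile_size
--         yield x, y, min(x + tile_size, x_max), min(y + tile_size, y_max)
-- ===== Notes on version B (the rewrite author's own statement) =====
-- stated objective: alternative
-- what changed: B replaces the nested y/x loops with a single flat loop over the tile index k in range(nx*ny), recovering (row, col) by divmod and computing each tile's coordinates arithmetically from k.
import Mathlib
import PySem

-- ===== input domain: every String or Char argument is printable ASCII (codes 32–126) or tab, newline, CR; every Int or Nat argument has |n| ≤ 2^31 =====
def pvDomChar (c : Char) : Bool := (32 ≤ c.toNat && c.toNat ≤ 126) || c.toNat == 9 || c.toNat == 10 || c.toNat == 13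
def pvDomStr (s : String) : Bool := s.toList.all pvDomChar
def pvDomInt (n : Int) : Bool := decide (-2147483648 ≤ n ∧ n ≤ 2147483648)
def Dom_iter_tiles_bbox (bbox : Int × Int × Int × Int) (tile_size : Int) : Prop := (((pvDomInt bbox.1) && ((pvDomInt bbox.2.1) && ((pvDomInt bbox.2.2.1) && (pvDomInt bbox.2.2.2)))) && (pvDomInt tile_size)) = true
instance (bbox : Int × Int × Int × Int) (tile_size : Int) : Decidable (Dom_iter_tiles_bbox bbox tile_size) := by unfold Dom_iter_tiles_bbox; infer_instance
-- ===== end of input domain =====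

-- B replaces A's nested y/x loops by ONE flat loop over the tile index k in range(nx*ny),
-- recovering (row, col) with divmod and computing each tile arithmetically (objective: alternative).
-- Both Pythons are lazy generators; the equivalence is about the yielded sequence.

-- ===== PORT A =====
def iter_tiles_bbox (bbox : Int × Int × Int × Int) (tile_size : Int) : List (Int × Int × Int × Int) :=
  let x_min := bbox.1; let y_min := bbox.2.1; let x_max := bbox.2.2.1; let y_max := bbox.2.2.2
  (PySem.List.pyRange y_min y_max tile_size).foldl (fun acc y =>
    let y_end := min (y + tile_size) y_max
    (PySem.List.pyRange x_min x_max tile_size).foldl (fun acc2 x =>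
      let x_end := min (x + tile_size) x_max
      acc2 ++ [(x, y, x_end, y_end)]) acc) []

-- ===== PORT B =====
def iter_tiles_bbox_alt (bbox : Int × Int × Int × Int) (tile_size : Int) : List (Int × Int × Int × Int) :=
  let x_min := bbox.1; let y_min := bbox.2.1; let x_max := bbox.2.2.1; let y_max := bbox.2.2.2
  let nx : Int := (PySem.List.pyRange x_min x_max tile_size).length  -- nx = len(range(x_min, x_max, tile_size))
  let ny : Int := (PySem.List.pyRange y_min y_max tile_size).length  -- ny = len(range(y_min, y_max, tile_size))
  (PySem.List.pyRange 0 (nx * ny) 1).map (fun k =>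
    let i := PySem.Int.floordiv k nx   -- i, j = divmod(k, nx)
    let j := PySem.Int.mod k nx
    let x := x_min + j * tile_size
    let y := y_min + i * tile_size
    (x, y, min (x + tile_size) x_max, min (y + tile_size) y_max))

-- ===== PRECONDITION & SPEC =====
-- Python's range raises ValueError when the step is 0 (in both A and B); excluded.
def Pre_iter_tiles_bbox (bbox : Int × Int × Int × Int) (tile_size : Int) : Prop := tile_size ≠ 0
instance (bbox : Int × Int × Int × Int) (tile_size : Int) : Decidable (Pre_iter_tiles_bbox bbox tile_size) := by unfold Pre_iter_tiles_bbox; infer_instance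
def pvWitness_iter_tiles_bbox : (Int × Int × Int × Int) × Int := ((0, 0, 5, 7), 3)

def Spec_iter_tiles_bbox (bbox : Int × Int × Int × Int) (tile_size : Int) (out : List (Int × Int × Int × Int)) : Prop := out = iter_tiles_bbox_alt bbox tile_size
instance (bbox : Int × Int × Int × Int) (tile_size : Int) (out : List (Int × Int × Int × Int)) : Decidable (Spec_iter_tiles_bbox bbox tile_size out) := by unfold Spec_iter_tiles_bbox; infer_instance

-- ===== CLAIM =====
def Claim_equal_iter_tiles_bbox : Prop := ∀ (bbox : Int × Int × Int × Int) (tile_size : Int), Dom_iter_tiles_bbox bbox tile_size → Pre_iter_tiles_bbox bbox tile_size → Spec_iter_tiles_bbox bbox tile_size (iter_tiles_bbox bbox tile_size)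

-- ===== LEMMAS AND PROOFS =====

-- any pyRange is the arithmetic progression of its own length
theorem pyRange_eq_range_map (a b s : Int) :
    PySem.List.pyRange a b s =
      (List.range (PySem.List.pyRange a b s).length).map (fun k : Nat => a + s * (k : Int)) := by
  unfold PySem.List.pyRange
  split_ifs <;> simp only [List.length_nil, List.length_map, List.length_range,
    List.range_zero, List.map_nil]

-- flattening a row-major double loop into one index loop with divmod
theorem range_mul_divmod {β : Type} (f : Nat → Nat → β) (n : Nat) :
    ∀ (m : Nat), (List.range (m * n)).map (fun k => f (k / n) (k % n)) =
      (List.range m).flatMap (fun i => (List.range n).map (fun j => f i j)) := by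
  intro m
  induction m with
  | zero => simp
  | succ m ih =>
    have h1 : (m + 1) * n = m * n + n := by ring
    rw [h1, List.range_add, List.map_append, ih, List.range_succ, List.flatMap_append]
    congr 1
    · simp only [List.flatMap_cons, List.flatMap_nil, List.append_nil, List.map_map]
      refine List.map_congr_left (fun j hj => ?_)
      have hjn : j < n := List.mem_range.mp hj
      have hn0 : 0 < n := by omega
      have hd : (m * n + j) / n = m := by
        rw [Nat.add_comm, Nat.mul_comm, Nat.add_mul_div_left _ _ hn0,
          Nat.div_eq_of_lt hjn, Nat.zero_add]
      have hm2 : (m * n + j) % n = j := by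
        rw [Nat.add_comm, Nat.mul_comm, Nat.add_mul_mod_self_left, Nat.mod_eq_of_lt hjn]
      simp [Function.comp, hd, hm2]

-- A's nested foldl-append loop is the flatMap of rows
theorem portA_flatMap (bbox : Int × Int × Int × Int) (ts : Int) :
    iter_tiles_bbox bbox ts =
      (PySem.List.pyRange bbox.2.1 bbox.2.2.2 ts).flatMap (fun y =>
        (PySem.List.pyRange bbox.1 bbox.2.2.1 ts).map
          (fun x => (x, y, min (x + ts) bbox.2.2.1, min (y + ts) bbox.2.2.2))) := by
  unfold iter_tiles_bbox
  simp [List.flatMap_def]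
  congr 1
  refine List.map_congr_left (fun y _ => ?_)
  induction PySem.List.pyRange bbox.1 bbox.2.2.1 ts with
  | nil => simp
  | cons a l ih => simpa [Function.comp] using ih

-- ===== VERDICT =====
theorem iter_tiles_bbox_spec : Claim_equal_iter_tiles_bbox := by
  intro bbox ts _ _
  unfold Spec_iter_tiles_bbox
  rw [portA_flatMap]
  have hBdef : iter_tiles_bbox_alt bbox ts =
      (PySem.List.pyRange 0
        (((PySem.List.pyRange bbox.1 bbox.2.2.1 ts).length : Int) *
         ((PySem.List.pyRange bbox.2.1 bbox.2.2.2 ts).length : Int)) 1).map (fun k =>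
        (bbox.1 + PySem.Int.mod k ((PySem.List.pyRange bbox.1 bbox.2.2.1 ts).length : Int) * ts,
         bbox.2.1 + PySem.Int.floordiv k ((PySem.List.pyRange bbox.1 bbox.2.2.1 ts).length : Int) * ts,
         min (bbox.1 + PySem.Int.mod k ((PySem.List.pyRange bbox.1 bbox.2.2.1 ts).length : Int) * ts + ts) bbox.2.2.1,
         min (bbox.2.1 + PySem.Int.floordiv k ((PySem.List.pyRange bbox.1 bbox.2.2.1 ts).length : Int) * ts + ts) bbox.2.2.2)) := rfl
  rw [hBdef]
  set nx : Nat := (PySem.List.pyRange bbox.1 bbox.2.2.1 ts).length with hnx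
  set ny : Nat := (PySem.List.pyRange bbox.2.1 bbox.2.2.2 ts).length with hny
  have hc : ((nx : Int) * (ny : Int)) = ((ny * nx : Nat) : Int) := by push_cast; ring
  rw [hc, PySem.List.pyRange_zero_natCast, List.map_map]
  have hB : ((fun k : Int =>
        ((bbox.1 + PySem.Int.mod k nx * ts, bbox.2.1 + PySem.Int.floordiv k nx * ts,
          min (bbox.1 + PySem.Int.mod k nx * ts + ts) bbox.2.2.1,
          min (bbox.2.1 + PySem.Int.floordiv k nx * ts + ts) bbox.2.2.2) :
            Int × Int × Int × Int)) ∘ (fun k : Nat => (k : Int))) =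
      fun k : Nat =>
        ((bbox.1 + ((k % nx : Nat) : Int) * ts, bbox.2.1 + ((k / nx : Nat) : Int) * ts,
          min (bbox.1 + ((k % nx : Nat) : Int) * ts + ts) bbox.2.2.1,
          min (bbox.2.1 + ((k / nx : Nat) : Int) * ts + ts) bbox.2.2.2) :
            Int × Int × Int × Int) := by
    funext k
    simp
  rw [hB, range_mul_divmod
    (fun i j => ((bbox.1 + (j : Int) * ts, bbox.2.1 + (i : Int) * ts,
      min (bbox.1 + (j : Int) * ts + ts) bbox.2.2.1,
      min (bbox.2.1 + (i : Int) * ts + ts) bbox.2.2.2) : Int × Int × Int × Int)) nx ny]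
  conv_lhs => rw [pyRange_eq_range_map bbox.2.1 bbox.2.2.2 ts,
    pyRange_eq_range_map bbox.1 bbox.2.2.1 ts]
  rw [List.flatMap_map]
  refine List.flatMap_congr (fun i _ => ?_)
  rw [List.map_map]
  refine List.map_congr_left (fun j _ => ?_)
  simp [Function.comp, mul_comm]
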